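-- pv_equiv track=rewrite | github.com/AISHU-Technology/kweaver | kw-knowledge/kw-builder/dao/subject_dao.py | is_subdocument
-- ===== SOURCE A (Python) =====
-- def is_subdocument(fold_gns, document_gns):
--     fold_gns_list = fold_gns.split("/")
--     document_gns_list = document_gns.split("/")
--     if len(document_gns_list) <= len(fold_gns_list):
--         return False
--
--     for i, item in enumerate(fold_gns_list):
--         if item != document_gns_list[i]:
--             return False
--     return True
-- ===== SOURCE B (Python) =====
-- def is_subdocument(fold_gns, document_gns):
--     return document_gns.startswith(fold_gns + "/")
-- ===== Notes on version B (the rewrite author's own statement) =====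
-- stated objective: simpler
-- what changed: Replaced the split-into-segments plus per-segment comparison loop by a single string prefix test: document_gns.startswith(fold_gns + "/"), which encodes the segment-boundary and proper-prefix conditions at once.
import Mathlib
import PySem

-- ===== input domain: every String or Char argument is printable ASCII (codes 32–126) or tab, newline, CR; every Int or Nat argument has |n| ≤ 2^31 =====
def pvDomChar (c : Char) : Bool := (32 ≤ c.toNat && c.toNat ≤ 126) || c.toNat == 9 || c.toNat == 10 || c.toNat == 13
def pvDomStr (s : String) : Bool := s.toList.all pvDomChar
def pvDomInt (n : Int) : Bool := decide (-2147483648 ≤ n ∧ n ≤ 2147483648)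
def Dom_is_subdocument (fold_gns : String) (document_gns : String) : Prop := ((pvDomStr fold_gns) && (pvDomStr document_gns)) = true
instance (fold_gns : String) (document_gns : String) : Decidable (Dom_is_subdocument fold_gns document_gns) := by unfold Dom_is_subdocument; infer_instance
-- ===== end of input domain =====

-- B replaces A's split-into-segments + per-segment comparison loop by a single
-- string prefix test document_gns.startswith(fold_gns + "/") (simpler, same cost).


-- ===== PORT A =====
-- the `for i, item in enumerate(fold_gns_list): if item != document_gns_list[i]: return False`
-- loop; the `none` branch (Python IndexError) is unreachable under A's length guard.
def pvLoopA (fl : List (List Char)) (i : Nat) (dl : List (List Char)) : Bool :=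
  match fl with
  | [] => true
  | item :: rest =>
    match dl[i]? with
    | none => false
    | some x => if item ≠ x then false else pvLoopA rest (i + 1) dl

def is_subdocument (fold_gns : String) (document_gns : String) : Bool :=
  let fold_gns_list := PySem.Chars.splitOn fold_gns.toList ['/']
  let document_gns_list := PySem.Chars.splitOn document_gns.toList ['/']
  if document_gns_list.length ≤ fold_gns_list.length then false
  else pvLoopA fold_gns_list 0 document_gns_list

-- ===== PORT B =====
def is_subdocument_alt (fold_gns : String) (document_gns : String) : Bool :=
  PySem.Str.startswith document_gns (fold_gns ++ "/")

-- ===== PRECONDITION & SPEC =====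
def Spec_is_subdocument (fold_gns : String) (document_gns : String) (out : Bool) : Prop := out = is_subdocument_alt fold_gns document_gns
instance (fold_gns : String) (document_gns : String) (out : Bool) : Decidable (Spec_is_subdocument fold_gns document_gns out) := by unfold Spec_is_subdocument; infer_instance

-- ===== CLAIM (what is proved, stated in full; the proofs are below) =====
def Claim_equal_is_subdocument : Prop := ∀ (fold_gns : String) (document_gns : String), Dom_is_subdocument fold_gns document_gns → Spec_is_subdocument fold_gns document_gns (is_subdocument fold_gns document_gns)

-- ===== LEMMAS AND PROOFS =====

-- plain structural model of splitting on '/'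
def pvSplitSlash : List Char → List (List Char)
  | [] => [[]]
  | c :: rest =>
    if c = '/' then [] :: pvSplitSlash rest
    else
      match pvSplitSlash rest with
      | [] => [[c]]
      | p :: ps => (c :: p) :: ps

theorem pvSplitSlash_cons_ex (l : List Char) : ∃ p ps, pvSplitSlash l = p :: ps := by
  induction l with
  | nil => exact ⟨[], [], rfl⟩
  | cons c rest ih =>
    obtain ⟨p, ps, hp⟩ := ih
    by_cases hc : c = '/'
    · exact ⟨[], pvSplitSlash rest, by simp [pvSplitSlash, hc]⟩
    · exact ⟨c :: p, ps, by simp [pvSplitSlash, hc, hp]⟩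

theorem pvSplitSlash_ne_nil (l : List Char) : pvSplitSlash l ≠ [] := by
  obtain ⟨p, ps, hp⟩ := pvSplitSlash_cons_ex l
  simp [hp]

theorem pv_go_slash (fuel : Nat) (l cur : List Char) (acc : List (List Char))
    (h : l.length ≤ fuel) :
    PySem.Chars.splitOn.go ['/'] fuel l cur acc =
      acc.reverse ++ List.modifyHead (cur.reverse ++ ·) (pvSplitSlash l) := by
  induction fuel generalizing l cur acc with
  | zero =>
    interval_cases hl : l.length
    rw [List.length_eq_zero_iff] at hl
    subst hl
    simp [PySem.Chars.splitOn.go, pvSplitSlash]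
  | succ fuel ih =>
    cases l with
    | nil => simp [PySem.Chars.splitOn.go, pvSplitSlash]
    | cons c rest =>
      rw [PySem.Chars.splitOn.go]
      by_cases hc : c = '/'
      · subst hc
        have hpre : List.isPrefixOf ['/'] ('/' :: rest) = true := by
          simp [List.isPrefixOf]
        rw [if_pos hpre]
        rw [show List.drop (['/'] : List Char).length ('/' :: rest) = rest from rfl]
        simp only [List.length_cons] at h
        rw [ih rest [] (cur.reverse :: acc) (by omega)]
        obtain ⟨p, ps, hp⟩ := pvSplitSlash_cons_ex rest
        simp [pvSplitSlash, hp]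
      · have hpre : List.isPrefixOf ['/'] (c :: rest) = false := by
          simp [List.isPrefixOf]
          intro hce; exact absurd hce.symm hc
        rw [if_neg (by simp [hpre])]
        simp only [List.length_cons] at h
        rw [ih rest (c :: cur) acc (by omega)]
        obtain ⟨p, ps, hp⟩ := pvSplitSlash_cons_ex rest
        simp [pvSplitSlash, hp, hc]

theorem pv_splitOn_slash (l : List Char) :
    PySem.Chars.splitOn l ['/'] = pvSplitSlash l := by
  rw [PySem.Chars.splitOn, pv_go_slash l.length.succ l [] [] (by omega)]
  obtain ⟨p, ps, hp⟩ := pvSplitSlash_cons_ex l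
  simp [hp]

-- joining the pieces back with '/'
def pvJoin : List (List Char) → List Char
  | [] => []
  | [p] => p
  | p :: q :: ps => p ++ '/' :: pvJoin (q :: ps)

theorem pvJoin_split (l : List Char) : pvJoin (pvSplitSlash l) = l := by
  induction l with
  | nil => rfl
  | cons c rest ih =>
    obtain ⟨p, ps, hp⟩ := pvSplitSlash_cons_ex rest
    by_cases hc : c = '/'
    · subst hc
      simp only [pvSplitSlash, hp]
      rw [hp] at ih
      simp [pvJoin, ih]
    · simp only [pvSplitSlash, if_neg hc, hp]
      rw [hp] at ih
      cases ps with
      | nil => simpa [pvJoin] using congrArg (c :: ·) ih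
      | cons q ps' => simpa [pvJoin] using congrArg (c :: ·) ih

theorem pvJoin_append (xs ys : List (List Char)) (hx : xs ≠ []) (hy : ys ≠ []) :
    pvJoin (xs ++ ys) = pvJoin xs ++ '/' :: pvJoin ys := by
  induction xs with
  | nil => exact absurd rfl hx
  | cons p xs' ih =>
    cases xs' with
    | nil => cases ys with
      | nil => exact absurd rfl hy
      | cons q ys' => simp [pvJoin]
    | cons q xs'' =>
      have := ih (by simp)
      simp only [List.cons_append, pvJoin] at *
      cases ys with
      | nil => exact absurd rfl hy
      | cons r ys' => simp [this]

theorem pvSplitSlash_append (a b : List Char) :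
    pvSplitSlash (a ++ '/' :: b) = pvSplitSlash a ++ pvSplitSlash b := by
  induction a with
  | nil => simp [pvSplitSlash]
  | cons c a' ih =>
    by_cases hc : c = '/'
    · simp [pvSplitSlash, hc, ih]
    · obtain ⟨p, ps, hp⟩ := pvSplitSlash_cons_ex (a' ++ '/' :: b)
      obtain ⟨q, qs, hq⟩ := pvSplitSlash_cons_ex a'
      rw [hq, hp] at ih
      simp only [List.cons_append, pvSplitSlash, if_neg hc, hp, hq]
      cases ih
      simp

theorem pvLoopA_iff (fl : List (List Char)) (i : Nat) (dl : List (List Char)) :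
    pvLoopA fl i dl = true ↔ fl <+: dl.drop i := by
  induction fl generalizing i with
  | nil => simp [pvLoopA]
  | cons item rest ih =>
    cases h : dl[i]? with
    | none =>
      have hlen : dl.length ≤ i := by simpa using List.getElem?_eq_none_iff.mp h
      have : dl.drop i = [] := List.drop_eq_nil_of_le hlen
      simp [pvLoopA, h, this]
    | some x =>
      have hi : i < dl.length := (List.getElem?_eq_some_iff.mp h).1
      have hx : dl[i] = x := by
        have := (List.getElem?_eq_some_iff.mp h).2; simpa using this
      have hdrop : dl.drop i = x :: dl.drop (i + 1) := by
        rw [List.drop_eq_getElem_cons hi, hx]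
      rw [hdrop]
      by_cases hne : item = x
      · subst hne
        simp [pvLoopA, h, ih, List.cons_prefix_cons]
      · simp [pvLoopA, h, hne, List.cons_prefix_cons]

theorem pv_main (f d : String) :
    is_subdocument f d = is_subdocument_alt f d := by
  rw [Bool.eq_iff_iff]
  unfold is_subdocument is_subdocument_alt
  simp only [pv_splitOn_slash, PySem.Str.startswith_eq, String.toList_append]
  have hslash : ("/" : String).toList = ['/'] := rfl
  rw [hslash, PySem.Chars.startswith_iff]
  set F := f.toList
  set D := d.toList
  constructor
  · intro hA
    split_ifs at hA with hlen
    rw [not_le] at hlen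
    have hpre : pvSplitSlash F <+: pvSplitSlash D := by
      simpa using (pvLoopA_iff (pvSplitSlash F) 0 (pvSplitSlash D)).mp hA
    obtain ⟨rest, hrest⟩ := hpre
    have hrne : rest ≠ [] := by
      intro h0
      rw [h0, List.append_nil] at hrest
      have := congrArg List.length hrest
      omega
    have hD : D = F ++ '/' :: pvJoin rest := by
      calc D = pvJoin (pvSplitSlash D) := (pvJoin_split D).symm
        _ = pvJoin (pvSplitSlash F ++ rest) := by rw [hrest]
        _ = pvJoin (pvSplitSlash F) ++ '/' :: pvJoin rest :=
            pvJoin_append _ _ (pvSplitSlash_ne_nil F) hrne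
        _ = F ++ '/' :: pvJoin rest := by rw [pvJoin_split]
    exact ⟨pvJoin rest, by rw [hD]; simp⟩
  · rintro ⟨t, ht⟩
    have hD : D = F ++ '/' :: t := by rw [← ht]; simp
    have hsplit : pvSplitSlash D = pvSplitSlash F ++ pvSplitSlash t := by
      rw [hD, pvSplitSlash_append]
    have htne : (pvSplitSlash t).length ≠ 0 := by
      simpa using pvSplitSlash_ne_nil t
    rw [if_neg (by rw [hsplit]; simp only [List.length_append]; omega)]
    rw [pvLoopA_iff]
    simp [hsplit]

-- ===== VERDICT (by name: the statement is the Claim_ definition above) =====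
theorem is_subdocument_spec : Claim_equal_is_subdocument := by
  intro f d _
  exact pv_main f d
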